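-- pv_equiv track=rewrite | github.com/looloolalaa/Python-Challenge | BOJ_조각움직이기.py | all_connected
-- ===== SOURCE A (Python) =====
-- dxy = [[0,1], [1,0], [0,-1], [-1,0]]
--
-- def all_connected(ps):
--     # [(0,0), (0,1), (0,3)]
--     element = ps[0]
--     s = set(ps)
--
--     def erase(p):
--         if p not in s:
--             return
--         s.remove(p)
--
--         for d in dxy:
--             a = p[0]+d[0], p[1]+d[1]
--             erase(a)
--
--     erase(element)
--     return len(s) == 0
-- ===== SOURCE B (Python) =====
-- dxy = [[0,1], [1,0], [0,-1], [-1,0]]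
--
-- def all_connected(ps):
--     # iterative DFS flood fill with an explicit stack instead of recursion
--     start = ps[0]
--     s = set(ps)
--     stack = [start]
--     while stack:
--         x, y = stack.pop()
--         if (x, y) in s:
--             s.remove((x, y))
--             # pushed in reverse so they are visited in the same order as dxy
--             stack += [(x - 1, y), (x, y - 1), (x + 1, y), (x, y + 1)]
--     return not s
-- ===== Notes on version B (the rewrite author's own statement) =====
-- stated objective: idiomatic
-- what changed: Replaces the nested recursive erase (which can hit Python's recursion limit) by an iterative DFS flood fill over an explicit worklist stack, popping a point, removing it from the set and pushing its four neighbors.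
import Mathlib
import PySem

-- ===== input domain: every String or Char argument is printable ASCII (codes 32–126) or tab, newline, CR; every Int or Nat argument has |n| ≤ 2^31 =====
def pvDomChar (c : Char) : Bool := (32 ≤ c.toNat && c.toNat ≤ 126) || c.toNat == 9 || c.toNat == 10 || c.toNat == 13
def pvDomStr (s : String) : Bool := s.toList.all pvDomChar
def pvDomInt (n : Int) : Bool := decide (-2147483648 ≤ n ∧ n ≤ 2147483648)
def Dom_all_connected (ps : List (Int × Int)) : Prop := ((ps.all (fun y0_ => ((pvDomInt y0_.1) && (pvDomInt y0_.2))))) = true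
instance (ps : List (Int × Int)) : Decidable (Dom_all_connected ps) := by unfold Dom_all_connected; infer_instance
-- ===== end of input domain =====

-- B replaces A's nested recursive erase with an iterative DFS flood fill over an explicit
-- worklist stack (objective: idiomatic; same asymptotic cost, return values proved equal).

-- ===== PORT A =====
def pvDxy : List (Int × Int) := [(0,1), (1,0), (0,-1), (-1,0)]

-- A's recursive erase; the fuel argument is a totality guard only: fuel ≥ |s| suffices
-- because each recursive call acts on a strictly smaller set.
def eraseA : Nat → PySem.Set (Int × Int) → Int × Int → PySem.Set (Int × Int)
  | 0, s, _ => s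
  | f+1, s, p =>
    if p ∈ s then
      pvDxy.foldl (fun t d => eraseA f t (p.1 + d.1, p.2 + d.2)) (s.discard p)
    else s

def all_connected (ps : List (Int × Int)) : Bool :=
  match PySem.List.pyGet? ps 0 with
  | none => false   -- ps[0] raises IndexError on []; excluded by Pre_
  | some element =>
    let s := PySem.Set.ofList ps
    (eraseA s.length s element).length == 0

-- ===== PORT B =====
-- termination helper for the worklist loop (cited by decreasing_by)
theorem pvDiscardLenLt {s : PySem.Set (Int × Int)} {p : Int × Int} (h : p ∈ s) :
    (s.discard p).length < s.length := by
  simp only [PySem.Set.discard]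
  refine List.length_filter_lt_length_iff_exists.mpr ⟨p, h, ?_⟩
  simp

-- worklist stack with the top at the head (Python pops from the end; Source B pushes the four
-- neighbors in reverse, so the visit order here is y+1, x+1, y-1, x-1 with straight conses)
def loopB (s : PySem.Set (Int × Int)) (stack : List (Int × Int)) : PySem.Set (Int × Int) :=
  match stack with
  | [] => s
  | p :: rest =>
    if h : p ∈ s then
      loopB (s.discard p)
        ((p.1, p.2 + 1) :: (p.1 + 1, p.2) :: (p.1, p.2 - 1) :: (p.1 - 1, p.2) :: rest)
    else loopB s rest
termination_by 5 * s.length + stack.length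
decreasing_by
  · have := pvDiscardLenLt h; simp only [List.length_cons]; omega
  · simp only [List.length_cons]; omega

def all_connected_alt (ps : List (Int × Int)) : Bool :=
  match PySem.List.pyGet? ps 0 with
  | none => false   -- ps[0] raises IndexError on []; excluded by Pre_
  | some start => (loopB (PySem.Set.ofList ps) [start]).isEmpty

-- ===== PRECONDITION & SPEC =====
-- Pre_ excludes only the empty list, on which A (and B) raise IndexError at ps[0].
def Pre_all_connected (ps : List (Int × Int)) : Prop := ps ≠ []
instance (ps : List (Int × Int)) : Decidable (Pre_all_connected ps) := by
  unfold Pre_all_connected; infer_instance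

def pvWitness_all_connected : (List (Int × Int)) := ([(0, 0), (0, 1), (2, 1)])

def Spec_all_connected (ps : List (Int × Int)) (out : Bool) : Prop := out = all_connected_alt ps
instance (ps : List (Int × Int)) (out : Bool) : Decidable (Spec_all_connected ps out) := by
  unfold Spec_all_connected; infer_instance

-- ===== CLAIM (what is proved, stated in full; the proofs are below) =====
def Claim_equal_all_connected : Prop :=
  ∀ (ps : List (Int × Int)), Dom_all_connected ps → Pre_all_connected ps →
    Spec_all_connected ps (all_connected ps)

-- ===== LEMMAS AND PROOFS =====

-- B's visit order of the four neighbors, as a list (proof-side only)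
def nbrsOf (p : Int × Int) : List (Int × Int) :=
  [(p.1, p.2 + 1), (p.1 + 1, p.2), (p.1, p.2 - 1), (p.1 - 1, p.2)]

theorem eraseA_not_mem {s : PySem.Set (Int × Int)} {p : Int × Int} (h : p ∉ s) :
    ∀ f, eraseA f s p = s := by
  intro f; cases f <;> simp [eraseA, h]

theorem eraseA_mem {s : PySem.Set (Int × Int)} {p : Int × Int} (h : p ∈ s) (f : Nat) :
    eraseA (f+1) s p = (nbrsOf p).foldl (fun t q => eraseA f t q) (s.discard p) := by
  simp [eraseA, h, pvDxy, nbrsOf, List.foldl, sub_eq_add_neg]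

theorem foldl_len {g : PySem.Set (Int × Int) → (Int × Int) → PySem.Set (Int × Int)}
    (hg : ∀ t q, (g t q).length ≤ t.length) :
    ∀ (L : List (Int × Int)) (s : PySem.Set (Int × Int)), (L.foldl g s).length ≤ s.length := by
  intro L
  induction L with
  | nil => intro s; simp
  | cons q L ih => intro s; exact le_trans (ih (g s q)) (hg s q)

theorem eraseA_len : ∀ (f : Nat) (s : PySem.Set (Int × Int)) (p : Int × Int),
    (eraseA f s p).length ≤ s.length := by
  intro f
  induction f with
  | zero => intro s p; simp [eraseA]
  | succ f ih =>
    intro s p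
    by_cases h : p ∈ s
    · rw [eraseA_mem h]
      exact le_trans (foldl_len (fun t q => ih t q) _ _) (List.length_filter_le _ _)
    · rw [eraseA_not_mem h]

theorem eraseA_len_mem {s : PySem.Set (Int × Int)} {p : Int × Int} (h : p ∈ s) (f : Nat) :
    (eraseA (f+1) s p).length ≤ s.length - 1 := by
  rw [eraseA_mem h]
  have h1 := foldl_len (g := fun t q => eraseA f t q) (fun t q => eraseA_len f t q)
    (nbrsOf p) (s.discard p)
  have h2 := pvDiscardLenLt h
  omega

theorem foldl_congr_fuel {k f1 f2 : Nat} {pf : (Int × Int) → (Int × Int)}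
    (hyp : ∀ (u : PySem.Set (Int × Int)) q, u.length ≤ k → eraseA f1 u q = eraseA f2 u q) :
    ∀ (L : List (Int × Int)) (t : PySem.Set (Int × Int)), t.length ≤ k →
      L.foldl (fun u d => eraseA f1 u (pf d)) t = L.foldl (fun u d => eraseA f2 u (pf d)) t := by
  intro L
  induction L with
  | nil => intro t _; rfl
  | cons d L ih =>
    intro t ht
    simp only [List.foldl_cons]
    rw [hyp t (pf d) ht]
    exact ih _ (le_trans (eraseA_len f2 t (pf d)) ht)

theorem eraseA_fuel : ∀ (n : Nat) (s : PySem.Set (Int × Int)) (p : Int × Int) (f g : Nat),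
    s.length ≤ n → s.length ≤ f → s.length ≤ g → eraseA f s p = eraseA g s p := by
  intro n
  induction n with
  | zero =>
    intro s p f g hn _ _
    have : s = [] := List.length_eq_zero_iff.mp (Nat.le_zero.mp hn)
    subst this
    rw [eraseA_not_mem (by simp), eraseA_not_mem (by simp)]
  | succ n ih =>
    intro s p f g hn hf hg
    by_cases h : p ∈ s
    · have hs : 1 ≤ s.length := List.length_pos_of_mem h
      obtain ⟨f', rfl⟩ : ∃ f', f = f' + 1 := ⟨f - 1, by omega⟩
      obtain ⟨g', rfl⟩ : ∃ g', g = g' + 1 := ⟨g - 1, by omega⟩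
      rw [eraseA_mem h, eraseA_mem h]
      refine foldl_congr_fuel (k := s.length - 1) (pf := id)
        (fun u q hu => ih u q f' g' (by omega) (by omega) (by omega)) _ _ ?_
      have := pvDiscardLenLt h; omega
    · rw [eraseA_not_mem h, eraseA_not_mem h]

theorem loopB_eq : ∀ (s : PySem.Set (Int × Int)) (stk : List (Int × Int)) (f : Nat),
    s.length ≤ f → loopB s stk = stk.foldl (fun t q => eraseA f t q) s := by
  intro s stk
  induction s, stk using loopB.induct with
  | case1 s => intro f _; rw [loopB, List.foldl_nil]
  | case2 s p rest h ih =>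
    intro f hf
    have hs : 1 ≤ s.length := List.length_pos_of_mem h
    obtain ⟨f', rfl⟩ : ∃ f', f = f' + 1 := ⟨f - 1, by omega⟩
    have hd := pvDiscardLenLt h
    rw [loopB]
    simp only [h, dif_pos]
    have hcons : ((p.1, p.2 + 1) :: (p.1 + 1, p.2) :: (p.1, p.2 - 1) :: (p.1 - 1, p.2) :: rest)
        = nbrsOf p ++ rest := by simp [nbrsOf]
    rw [ih f' (by omega), hcons, List.foldl_append, ← eraseA_mem h]
    simp only [List.foldl_cons]
    refine foldl_congr_fuel (k := s.length - 1) (pf := id)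
      (fun u q hu => eraseA_fuel (s.length - 1) u q f' (f' + 1) hu (by omega) (by omega))
      rest _ ?_
    exact eraseA_len_mem h f'
  | case3 s p rest h ih =>
    intro f hf
    rw [loopB]
    simp only [h, dif_neg, not_false_iff]
    rw [ih f hf, List.foldl_cons, eraseA_not_mem h]

-- ===== VERDICT (by name: the statement is the Claim_ definition above) =====
theorem all_connected_spec : Claim_equal_all_connected := by
  unfold Claim_equal_all_connected
  intro ps _ hpre
  unfold Spec_all_connected all_connected all_connected_alt
  match hps : ps with
  | [] => exact absurd rfl hpre
  | q :: t =>
    have hget : PySem.List.pyGet? (q :: t) (0 : Int) = some q := by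
      simp [PySem.List.pyGet?, PySem.List.pyIdx?]
    rw [hget]
    simp only
    rw [loopB_eq _ _ (PySem.Set.ofList (q :: t)).length (le_refl _), List.foldl_cons,
        List.foldl_nil]
    cases eraseA (PySem.Set.ofList (q :: t)).length (PySem.Set.ofList (q :: t)) q <;> simp
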